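-- pv_equiv track=rewrite | github.com/leah-1ee/coding-test-study | 프로그래머스/1/42862. 체육복/체육복.py | solution
-- ===== SOURCE A (Python) =====
-- def solution(n, lost, reserve):
--     # 본인이 도난당한 경우 제외
--     real_lost = set(lost) - set(reserve)
--     real_reserve = set(reserve) - set(lost)
--
--     for person in sorted(real_reserve):
--         # 전 번호가 도난당함
--         if person-1 in real_lost:
--             real_lost.remove(person-1)
--
--         # 뒤 번호가 도난당함
--         elif person+1 in real_lost:
--             real_lost.remove(person+1)
--
--     # 전체 인원 - 체육복을 빌리지 못한 사람 수
--     return n - len(real_lost)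
-- ===== SOURCE B (Python) =====
-- def solution(n, lost, reserve):
--     # Two-pointer sweep over the two sorted cleaned lists instead of the
--     # per-reserver set mutation loop.
--     L = sorted(set(lost) - set(reserve))
--     R = sorted(set(reserve) - set(lost))
--     i = j = matched = 0
--     while i < len(L) and j < len(R):
--         if L[i] < R[j] - 1:
--             i += 1
--         elif L[i] > R[j] + 1:
--             j += 1
--         else:
--             matched += 1
--             i += 1
--             j += 1
--     return n - (len(L) - matched)
-- ===== Notes on version B (the rewrite author's own statement) =====
-- stated objective: alternative
-- what changed: Replaces the loop that mutates the lost-set per reserver (membership test + set.remove) with a single two-pointer merge over the two sorted cleaned lists that directly counts matches.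
import Mathlib
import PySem

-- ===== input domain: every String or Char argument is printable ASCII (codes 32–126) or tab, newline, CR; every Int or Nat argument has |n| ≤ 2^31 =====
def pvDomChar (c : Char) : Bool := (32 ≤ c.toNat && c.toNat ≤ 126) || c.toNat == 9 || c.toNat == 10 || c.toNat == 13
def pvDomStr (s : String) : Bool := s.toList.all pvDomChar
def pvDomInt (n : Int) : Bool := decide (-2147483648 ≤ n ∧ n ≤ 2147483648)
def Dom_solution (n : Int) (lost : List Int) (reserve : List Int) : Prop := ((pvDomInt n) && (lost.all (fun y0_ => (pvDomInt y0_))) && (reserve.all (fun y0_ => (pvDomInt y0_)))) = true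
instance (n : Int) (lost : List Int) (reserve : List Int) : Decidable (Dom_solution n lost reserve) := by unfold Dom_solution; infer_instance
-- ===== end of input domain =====

-- B replaces A's per-reserver set-mutation loop by a single two-pointer merge of the two
-- sorted cleaned lists (alternative decomposition; return value proved equal).

-- ===== PORT A =====
-- one iteration of A's for-loop body; real_lost.remove(x) is guarded by 'x in real_lost',
-- so PySem.Set.remove? is some there and .getD never takes its default
def solutionStep (realLost : PySem.Set Int) (person : Int) : PySem.Set Int :=
  if PySem.Set.contains realLost (person - 1) then
    (PySem.Set.remove? realLost (person - 1)).getD realLost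
  else if PySem.Set.contains realLost (person + 1) then
    (PySem.Set.remove? realLost (person + 1)).getD realLost
  else realLost

def solution (n : Int) (lost : List Int) (reserve : List Int) : Int :=
  let realLost : PySem.Set Int := PySem.Set.diff (PySem.Set.ofList lost) (PySem.Set.ofList reserve)
  let realReserve : PySem.Set Int := PySem.Set.diff (PySem.Set.ofList reserve) (PySem.Set.ofList lost)
  let finalLost := (PySem.List.sorted realReserve (fun x => x) false).foldl solutionStep realLost
  n - PySem.Set.len finalLost

-- ===== PORT B =====
-- the while loop of Source B: consuming the heads of L and R is the two-pointer advance
def solutionMatch : List Int → List Int → Nat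
  | _, [] => 0
  | [], _ :: _ => 0
  | l :: L, r :: R =>
    if l < r - 1 then solutionMatch L (r :: R)
    else if l > r + 1 then solutionMatch (l :: L) R
    else 1 + solutionMatch L R
termination_by L R => L.length + R.length

def solution_alt (n : Int) (lost : List Int) (reserve : List Int) : Int :=
  let L := PySem.List.sorted (PySem.Set.diff (PySem.Set.ofList lost) (PySem.Set.ofList reserve)) (fun x => x) false
  let R := PySem.List.sorted (PySem.Set.diff (PySem.Set.ofList reserve) (PySem.Set.ofList lost)) (fun x => x) false
  n - ((L.length : Int) - (solutionMatch L R : Int))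

-- ===== PRECONDITION & SPEC =====
def Spec_solution (n : Int) (lost : List Int) (reserve : List Int) (out : Int) : Prop := out = solution_alt n lost reserve
instance (n : Int) (lost : List Int) (reserve : List Int) (out : Int) : Decidable (Spec_solution n lost reserve out) := by unfold Spec_solution; infer_instance

-- ===== CLAIM (what is proved, stated in full; the proofs are below) =====
def Claim_equal_solution : Prop := ∀ (n : Int) (lost : List Int) (reserve : List Int), Dom_solution n lost reserve → Spec_solution n lost reserve (solution n lost reserve)

-- ===== LEMMAS AND PROOFS =====

-- A's loop body, rewritten through set membership and discard
theorem solutionStep_eq (L : PySem.Set Int) (r : Int) :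
    solutionStep L r =
      if r - 1 ∈ L then PySem.Set.discard L (r - 1)
      else if r + 1 ∈ L then PySem.Set.discard L (r + 1)
      else L := by
  unfold solutionStep
  by_cases h1 : r - 1 ∈ L
  · simp [h1, PySem.Set.remove?_of_mem h1]
  · have c1 : PySem.Set.contains L (r - 1) = false := by
      simpa using (fun h => h1 ((PySem.Set.contains_iff _ _).1 h))
    by_cases h2 : r + 1 ∈ L
    · simp [h1, PySem.Set.remove?_of_mem h2]
    · have c2 : PySem.Set.contains L (r + 1) = false := by
        simpa using (fun h => h2 ((PySem.Set.contains_iff _ _).1 h))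
      simp [h1, h2]

theorem discard_of_not_mem {L : List Int} {v : Int} (h : v ∉ L) :
    PySem.Set.discard L v = L := by
  apply List.filter_eq_self.2
  intro a ha
  have hne : ¬ a = v := fun e => h (e ▸ ha)
  simp [hne]

theorem discard_cons_self {L : List Int} {v : Int} (h : v ∉ L) :
    PySem.Set.discard (v :: L) v = L := by
  have : PySem.Set.discard (v :: L) v = PySem.Set.discard L v := by
    simp [PySem.Set.discard]
  rw [this, discard_of_not_mem h]

theorem discard_cons_ne (L : List Int) {l v : Int} (h : l ≠ v) :
    PySem.Set.discard (l :: L) v = l :: PySem.Set.discard L v := by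
  simp [PySem.Set.discard, h]

theorem length_discard_of_mem {L : List Int} {v : Int}
    (hs : L.Pairwise (· < ·)) (hv : v ∈ L) :
    (PySem.Set.discard L v).length + 1 = L.length := by
  induction L with
  | nil => cases hv
  | cons l L ih =>
    rcases List.pairwise_cons.1 hs with ⟨hl, hL⟩
    by_cases e : l = v
    · subst e
      have : l ∉ L := fun h => lt_irrefl l (hl l h)
      rw [discard_cons_self this]
      simp
    · rcases List.mem_cons.1 hv with h | h
      · exact absurd h.symm e
      · rw [discard_cons_ne _ e]
        simpa using ih hL h

theorem pairwise_discard {L : List Int} {v : Int} (hs : L.Pairwise (· < ·)) :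
    (PySem.Set.discard L v).Pairwise (· < ·) :=
  hs.sublist List.filter_sublist

theorem mem_of_mem_discard {L : List Int} {v y : Int}
    (h : y ∈ PySem.Set.discard L v) : y ∈ L :=
  ((PySem.Set.mem_discard L v y).1 h).1

-- B skips a lost student strictly below every remaining reserver's reach
theorem solutionMatch_skip {l : Int} (X R : List Int)
    (h : ∀ r' ∈ R, l < r' - 1) :
    solutionMatch (l :: X) R = solutionMatch X R := by
  cases R with
  | nil => cases X <;> simp [solutionMatch]
  | cons r R => simp [solutionMatch, h r (List.mem_cons_self)]

-- crux: one reserver r against the sorted lost list L does what A's loop body does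
theorem solutionMatch_step (L : List Int) (r : Int) (R' : List Int)
    (hL : L.Pairwise (· < ·)) (hr : r ∉ L) (hR : ∀ r' ∈ R', r < r') :
    solutionMatch L (r :: R') =
      (if r - 1 ∈ L then 1 + solutionMatch (PySem.Set.discard L (r - 1)) R'
       else if r + 1 ∈ L then 1 + solutionMatch (PySem.Set.discard L (r + 1)) R'
       else solutionMatch L R') := by
  induction L with
  | nil =>
    have : solutionMatch [] (r :: R') = 0 := by simp [solutionMatch]
    have h0 : solutionMatch [] R' = 0 := by cases R' <;> simp [solutionMatch]
    simp [this, h0]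
  | cons l L ih =>
    rcases List.pairwise_cons.1 hL with ⟨hl, hLp⟩
    have hrL : r ∉ L := fun h => hr (List.mem_cons_of_mem _ h)
    have hlr : l ≠ r := fun e => hr (e ▸ List.mem_cons_self)
    rcases lt_trichotomy l (r - 1) with hc | hc | hc
    · -- l < r-1 : both sides skip l
      have hne1 : l ≠ r - 1 := ne_of_lt hc
      have hne2 : l ≠ r + 1 := by omega
      have m1 : (r - 1 ∈ l :: L) ↔ (r - 1 ∈ L) := by
        constructor
        · intro h; rcases List.mem_cons.1 h with h | h
          · exact absurd h.symm hne1
          · exact h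
        · exact List.mem_cons_of_mem _
      have m2 : (r + 1 ∈ l :: L) ↔ (r + 1 ∈ L) := by
        constructor
        · intro h; rcases List.mem_cons.1 h with h | h
          · exact absurd h.symm hne2
          · exact h
        · exact List.mem_cons_of_mem _
      have skipR' : ∀ r' ∈ R', l < r' - 1 := fun r' h => by have := hR r' h; omega
      have lhs : solutionMatch (l :: L) (r :: R') = solutionMatch L (r :: R') := by
        simp [solutionMatch, hc]
      rw [lhs, ih hLp hrL]
      by_cases h1 : r - 1 ∈ L
      · rw [if_pos h1, if_pos (m1.2 h1),
          discard_cons_ne (v := r - 1) L hne1,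
          solutionMatch_skip _ _ skipR']
      · rw [if_neg h1, if_neg (fun h => h1 (m1.1 h))]
        by_cases h2 : r + 1 ∈ L
        · rw [if_pos h2, if_pos (m2.2 h2),
            discard_cons_ne (v := r + 1) L hne2,
            solutionMatch_skip _ _ skipR']
        · rw [if_neg h2, if_neg (fun h => h2 (m2.1 h)),
            solutionMatch_skip _ _ skipR']
    · -- l = r-1 : matched with r
      subst hc
      have hnm : r - 1 ∉ L := fun h => lt_irrefl _ (hl _ h)
      have lhs : solutionMatch ((r - 1) :: L) (r :: R') = 1 + solutionMatch L R' := by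
        have c1 : ¬ (r - 1 < r - 1) := lt_irrefl _
        have c2 : ¬ (r - 1 > r + 1) := by omega
        simp [solutionMatch, c2]
      rw [lhs, if_pos (List.mem_cons_self), discard_cons_self hnm]
    · -- l > r-1, and l ≠ r, so l ≥ r+1
      have hge : r + 1 ≤ l := by omega
      have h1' : r - 1 ∉ l :: L := by
        intro h
        rcases List.mem_cons.1 h with h | h
        · omega
        · exact absurd (hl _ h) (by omega)
      by_cases he : l = r + 1
      · -- l = r+1 : matched with r
        subst he
        have hnm : r + 1 ∉ L := fun h => lt_irrefl _ (hl _ h)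
        have lhs : solutionMatch ((r + 1) :: L) (r :: R') = 1 + solutionMatch L R' := by
          have c1 : ¬ (r + 1 < r - 1) := by omega
          have c2 : ¬ (r + 1 > r + 1) := lt_irrefl _
          simp [solutionMatch, c1]
        rw [lhs, if_neg h1', if_pos (List.mem_cons_self), discard_cons_self hnm]
      · -- l > r+1 : r helps nobody
        have hgt : r + 1 < l := lt_of_le_of_ne hge (fun e => he e.symm)
        have h2' : r + 1 ∉ l :: L := by
          intro h
          rcases List.mem_cons.1 h with h | h
          · omega
          · exact absurd (hl _ h) (by omega)
        have lhs : solutionMatch (l :: L) (r :: R') = solutionMatch (l :: L) R' := by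
          have c1 : ¬ (l < r - 1) := by omega
          simp [solutionMatch, c1, hgt]
        rw [lhs, if_neg h1', if_neg h2']

-- loop correspondence: A's fold over the reservers + B's match count = the lost count
theorem fold_match (R : List Int) : ∀ (L : List Int),
    L.Pairwise (· < ·) → R.Pairwise (· < ·) → (∀ r ∈ R, r ∉ L) →
    (R.foldl solutionStep L).length + solutionMatch L R = L.length := by
  induction R with
  | nil => intro L _ _ _; cases L <;> simp [solutionMatch]
  | cons r R ih =>
    intro L hL hR hd
    rcases List.pairwise_cons.1 hR with ⟨hrlt, hRp⟩
    have hrL : r ∉ L := hd r List.mem_cons_self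
    rw [List.foldl_cons, solutionStep_eq,
      solutionMatch_step L r R hL hrL hrlt]
    by_cases h1 : r - 1 ∈ L
    · rw [if_pos h1, if_pos h1]
      have hrec := ih (PySem.Set.discard L (r - 1)) (pairwise_discard hL) hRp
        (fun r' h' hm => hd r' (List.mem_cons_of_mem _ h') (mem_of_mem_discard hm))
      have hlen := length_discard_of_mem hL h1
      omega
    · rw [if_neg h1, if_neg h1]
      by_cases h2 : r + 1 ∈ L
      · rw [if_pos h2, if_pos h2]
        have hrec := ih (PySem.Set.discard L (r + 1)) (pairwise_discard hL) hRp
          (fun r' h' hm => hd r' (List.mem_cons_of_mem _ h') (mem_of_mem_discard hm))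
        have hlen := length_discard_of_mem hL h2
        omega
      · rw [if_neg h2, if_neg h2]
        exact ih L hL hRp (fun r' h' => hd r' (List.mem_cons_of_mem _ h'))

-- A's fold only looks at membership / filters, so it maps permutations to permutations
theorem solutionStep_perm {L L' : PySem.Set Int} (h : L.Perm L') (r : Int) :
    (solutionStep L r).Perm (solutionStep L' r) := by
  rw [solutionStep_eq, solutionStep_eq]
  have m1 : (r - 1 ∈ L) ↔ (r - 1 ∈ L') := h.mem_iff
  have m2 : (r + 1 ∈ L) ↔ (r + 1 ∈ L') := h.mem_iff
  by_cases h1 : r - 1 ∈ L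
  · rw [if_pos h1, if_pos (m1.1 h1)]; exact h.filter _
  · rw [if_neg h1, if_neg (fun hh => h1 (m1.2 hh))]
    by_cases h2 : r + 1 ∈ L
    · rw [if_pos h2, if_pos (m2.1 h2)]; exact h.filter _
    · rw [if_neg h2, if_neg (fun hh => h2 (m2.2 hh))]; exact h

theorem foldl_solutionStep_perm (R : List Int) : ∀ {L L' : PySem.Set Int}, L.Perm L' →
    (R.foldl solutionStep L).Perm (R.foldl solutionStep L') := by
  induction R with
  | nil => intro L L' h; simpa using h
  | cons r R ih => intro L L' h; exact ih (solutionStep_perm h r)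

theorem pairwise_lt_of_sorted_nodup {L : List Int} (hn : L.Nodup)
    {Ls : List Int} (he : Ls = PySem.List.sorted L (fun x => x) false) :
    Ls.Pairwise (· < ·) := by
  subst he
  have hle := PySem.List.sorted_pairwise L (fun x => x)
  have hnd : (PySem.List.sorted L (fun x => x) false).Nodup :=
    ((PySem.List.sorted_perm L (fun x => x) false).nodup_iff).2 hn
  exact (hle.and hnd).imp (fun h => lt_of_le_of_ne h.1 h.2)

-- ===== VERDICT (by name: the statement is the Claim_ definition above) =====
theorem solution_spec : Claim_equal_solution := by
  intro n lost reserve _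
  unfold Spec_solution solution solution_alt
  set RL : PySem.Set Int := PySem.Set.diff (PySem.Set.ofList lost) (PySem.Set.ofList reserve) with hRL
  set RR : PySem.Set Int := PySem.Set.diff (PySem.Set.ofList reserve) (PySem.Set.ofList lost) with hRR
  set Ls := PySem.List.sorted RL (fun x => x) false with hLs
  set Rs := PySem.List.sorted RR (fun x => x) false with hRs
  have hRLnd : RL.Nodup := PySem.Set.nodup_diff _ _ (PySem.Set.nodup_ofList lost)
  have hRRnd : RR.Nodup := PySem.Set.nodup_diff _ _ (PySem.Set.nodup_ofList reserve)
  have hLsp : Ls.Pairwise (· < ·) := pairwise_lt_of_sorted_nodup hRLnd hLs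
  have hRsp : Rs.Pairwise (· < ·) := pairwise_lt_of_sorted_nodup hRRnd hRs
  have hdisj : ∀ r ∈ Rs, r ∉ Ls := by
    intro r hres hlost
    have h1 : r ∈ RR := by rw [hRs, PySem.List.mem_sorted] at hres; exact hres
    have h2 : r ∈ RL := by rw [hLs, PySem.List.mem_sorted] at hlost; exact hlost
    have h1' := (PySem.Set.mem_diff _ _ r).1 h1
    have h2' := (PySem.Set.mem_diff _ _ r).1 h2
    exact h1'.2 h2'.1
  have hperm : (Rs.foldl solutionStep RL).Perm (Rs.foldl solutionStep Ls) :=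
    foldl_solutionStep_perm Rs ((PySem.List.sorted_perm RL (fun x => x) false).symm)
  have hmain := fold_match Rs Ls hLsp hRsp hdisj
  have hlen : (Rs.foldl solutionStep RL).length = (Rs.foldl solutionStep Ls).length :=
    hperm.length_eq
  simp only [PySem.Set.len]
  rw [hlen]
  omega
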